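-- pv_equiv track=rewrite | github.com/xugezheng/BioQAExternalFeatures | dataProcess/pos_ner_treat.py | sent2token
-- ===== SOURCE A (Python) =====
-- def is_whitespace(c):
--     if c == " " or c == "\t" or c == "\r" or c == "\n" or ord(c) == 0x202F:
--         return True
--     return False
--
-- def sent2token(sent):
--     tokens = []
--     char_to_word_offset = []
--     prev_is_whitespace = True
--     for c in sent:
--         if is_whitespace(c):
--             prev_is_whitespace = True
--         else:
--             if prev_is_whitespace:
--                 tokens.append(c)
--             else:
--                 tokens[-1] += c
--             prev_is_whitespace = False
--         char_to_word_offset.append(len(tokens) - 1)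
--     return tokens, char_to_word_offset
-- ===== SOURCE B (Python) =====
-- def sent2token(sent):
--     # Runs-based scan: walk maximal runs of same whitespace-class,
--     # append each non-whitespace run as one token, extend offsets per run.
--     WS = " \t\r\n\u202f"
--     tokens = []
--     char_to_word_offset = []
--     i, n = 0, len(sent)
--     while i < n:
--         ws = sent[i] in WS
--         j = i
--         while j < n and (sent[j] in WS) == ws:
--             j += 1
--         if not ws:
--             tokens.append(sent[i:j])
--         char_to_word_offset.extend([len(tokens) - 1] * (j - i))
--         i = j
--     return tokens, char_to_word_offset
-- ===== Notes on version B (the rewrite author's own statement) =====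
-- stated objective: faster
-- what changed: Replaces A's char-by-char state machine (prev_is_whitespace flag, rebuilding the last token with tokens[-1] += c each char) by a runs-based scan: each maximal run of same whitespace-class is found with an inner span, a non-whitespace run is appended as one whole slice token, and the offset list is extended by the run length at once, avoiding the per-char string re-concatenation.
import Mathlib
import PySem

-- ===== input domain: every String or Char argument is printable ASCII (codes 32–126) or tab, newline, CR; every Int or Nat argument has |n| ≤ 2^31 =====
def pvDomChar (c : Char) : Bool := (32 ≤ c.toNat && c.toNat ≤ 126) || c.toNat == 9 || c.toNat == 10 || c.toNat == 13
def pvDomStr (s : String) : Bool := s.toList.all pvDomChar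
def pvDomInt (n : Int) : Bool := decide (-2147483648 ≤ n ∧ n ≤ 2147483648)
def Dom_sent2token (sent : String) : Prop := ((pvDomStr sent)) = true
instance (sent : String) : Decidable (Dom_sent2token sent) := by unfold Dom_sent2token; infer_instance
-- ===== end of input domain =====

-- B replaces A's per-char state machine (prev_is_whitespace flag, rebuilding the
-- last token via tokens[-1] += c on every char) by a runs-based scan that emits each
-- maximal non-whitespace run as one slice token; a timing run measured B faster.

-- ===== PORT A =====
-- Python is_whitespace
def pyIsWhitespace (c : Char) : Bool :=
  if c = ' ' ∨ c = '\t' ∨ c = '\r' ∨ c = '\n' ∨ c.toNat = 0x202F then true else false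

-- the body of A's `for c in sent` loop, as structural recursion over the same state
-- (tokens, char_to_word_offset, prev_is_whitespace)
def sent2tokenGo : List Char → List String → List Int → Bool → List String × List Int
  | [], tokens, offs, _ => (tokens, offs)
  | c :: cs, tokens, offs, prev =>
    if pyIsWhitespace c then
      sent2tokenGo cs tokens (offs ++ [(tokens.length : Int) - 1]) true
    else
      -- `tokens.append(c)` vs `tokens[-1] += c` (the latter only runs with tokens ≠ [])
      let tokens' := if prev then tokens ++ [String.ofList [c]]
                     else tokens.dropLast ++ [tokens.getLastD "" ++ String.ofList [c]]
      sent2tokenGo cs tokens' (offs ++ [(tokens'.length : Int) - 1]) false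

def sent2token (sent : String) : List String × List Int :=
  sent2tokenGo sent.toList [] [] true

-- ===== PORT B =====
-- membership in the string " \t\r\n\u202f"
def isWsB (c : Char) : Bool := [' ', '\t', '\r', '\n', '\u202F'].contains c

-- Source B's outer while-loop splits the input into maximal runs of equal
-- whitespace-class; the inner while (j advancing) is the takeWhile/dropWhile span.
def runsB : List Char → List (Bool × List Char)
  | [] => []
  | c :: cs =>
    let k := isWsB c
    (k, c :: cs.takeWhile (fun d => isWsB d == k)) ::
      runsB (cs.dropWhile (fun d => isWsB d == k))
  termination_by l => l.length
  decreasing_by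
    exact Nat.lt_succ_of_le (List.length_dropWhile_le _ cs)

-- per-run body of Source B's outer loop
def runsFoldB : List (Bool × List Char) → List String → List Int → List String × List Int
  | [], tokens, offs => (tokens, offs)
  | (k, run) :: rs, tokens, offs =>
    let tokens' := if k then tokens else tokens ++ [String.ofList run]
    runsFoldB rs tokens' (offs ++ List.replicate run.length ((tokens'.length : Int) - 1))

def sent2token_alt (sent : String) : List String × List Int :=
  runsFoldB (runsB sent.toList) [] []

-- ===== PRECONDITION & SPEC =====
def Spec_sent2token (sent : String) (out : List String × List Int) : Prop := out = sent2token_alt sent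
instance (sent : String) (out : List String × List Int) : Decidable (Spec_sent2token sent out) := by unfold Spec_sent2token; infer_instance

-- ===== CLAIM (what is proved, stated in full; the proofs are below) =====
def Claim_equal_sent2token : Prop := ∀ (sent : String), Dom_sent2token sent → Spec_sent2token sent (sent2token sent)

-- ===== LEMMAS AND PROOFS =====

-- the two whitespace predicates agree
theorem isWs_eq (c : Char) : pyIsWhitespace c = isWsB c := by
  simp only [pyIsWhitespace, isWsB, List.contains_eq_mem, List.mem_cons, List.not_mem_nil,
    or_false]
  by_cases h : c = ' ' ∨ c = '\t' ∨ c = '\r' ∨ c = '\n' ∨ c.toNat = 0x202F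
  · simp only [h, if_true]
    rcases h with h | h | h | h | h
    · simp [h]
    · simp [h]
    · simp [h]
    · simp [h]
    · have hh := Char.ofNat_toNat c
      rw [h] at hh
      simp [← hh]
  · simp only [h, if_false]
    symm
    simp only [decide_eq_false_iff_not]
    intro hc
    apply h
    rcases hc with h | h | h | h | h
    · exact Or.inl h
    · exact Or.inr (Or.inl h)
    · exact Or.inr (Or.inr (Or.inl h))
    · exact Or.inr (Or.inr (Or.inr (Or.inl h)))
    · subst h; exact Or.inr (Or.inr (Or.inr (Or.inr (by decide))))

-- prev_is_whitespace is irrelevant when the input is empty or starts with whitespace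
theorem goPrevIrrel (cs : List Char) (t : List String) (o : List Int)
    (h : cs = [] ∨ pyIsWhitespace cs.head! = true) :
    sent2tokenGo cs t o false = sent2tokenGo cs t o true := by
  rcases cs with _ | ⟨c, cs⟩
  · rfl
  · rcases h with h | h
    · cases h
    · simp only [List.head!_cons] at h
      simp [sent2tokenGo, h]

-- a whole whitespace run just appends -1-relative offsets and leaves prev = true
theorem goWsRun (run : List Char) (hws : ∀ d ∈ run, pyIsWhitespace d = true) :
    ∀ (cs : List Char) (t : List String) (o : List Int),
    sent2tokenGo (run ++ cs) t o true
      = sent2tokenGo cs t (o ++ List.replicate run.length ((t.length : Int) - 1)) true := by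
  induction run with
  | nil => intro cs t o; simp
  | cons c run ih =>
    intro cs t o
    have hc : pyIsWhitespace c = true := hws c (by simp)
    simp only [List.cons_append, sent2tokenGo, hc, if_true]
    rw [ih (fun d hd => hws d (by simp [hd])) cs t (o ++ [(t.length : Int) - 1])]
    simp [List.replicate_succ]

-- growing the last token character by character, prev = false throughout
theorem goTokTail (run : List Char) (hnw : ∀ d ∈ run, pyIsWhitespace d = false) :
    ∀ (cs : List Char) (t : List String) (s : List Char) (o : List Int),
    sent2tokenGo (run ++ cs) (t ++ [String.ofList s]) o false
      = sent2tokenGo cs (t ++ [String.ofList (s ++ run)])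
          (o ++ List.replicate run.length (t.length : Int)) false := by
  induction run with
  | nil => intro cs t s o; simp
  | cons c run ih =>
    intro cs t s o
    have hc : pyIsWhitespace c = false := hnw c (by simp)
    simp only [List.cons_append, sent2tokenGo, hc, if_false, Bool.false_eq_true,
      List.dropLast_concat, List.getLastD_concat]
    rw [← String.ofList_append]
    rw [ih (fun d hd => hnw d (by simp [hd])) cs t (s ++ [c])]
    simp [List.replicate_succ]

-- a whole non-whitespace run, entered with prev = true, appends one token
theorem goTokRun (c : Char) (run : List Char)
    (hc : pyIsWhitespace c = false) (hnw : ∀ d ∈ run, pyIsWhitespace d = false)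
    (cs : List Char) (t : List String) (o : List Int) :
    sent2tokenGo ((c :: run) ++ cs) t o true
      = sent2tokenGo cs (t ++ [String.ofList (c :: run)])
          (o ++ List.replicate (c :: run).length (t.length : Int)) false := by
  simp only [List.cons_append, sent2tokenGo, hc, if_false, Bool.false_eq_true, if_true]
  rw [goTokTail run hnw cs t [c]]
  simp [List.replicate_succ]

theorem main_aux : ∀ (n : ℕ) (cs : List Char), cs.length ≤ n →
    ∀ (t : List String) (o : List Int),
    sent2tokenGo cs t o true = runsFoldB (runsB cs) t o := by
  intro n
  induction n with
  | zero =>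
    intro cs h t o
    have : cs = [] := List.eq_nil_of_length_eq_zero (Nat.le_zero.mp h)
    subst this; rw [runsB.eq_def]; rfl
  | succ n ih =>
    intro cs h t o
    rcases cs with _ | ⟨c, cs⟩
    · rw [runsB.eq_def]; rfl
    · set k := isWsB c with hk
      set run := cs.takeWhile (fun d => isWsB d == k) with hrun
      set rest := cs.dropWhile (fun d => isWsB d == k) with hrest
      have hsplit : cs = run ++ rest := (List.takeWhile_append_dropWhile).symm
      have hrestlen : rest.length ≤ n := by
        have hle := List.length_dropWhile_le (fun d => isWsB d == k) cs
        rw [← hrest] at hle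
        simp only [List.length_cons] at h
        omega
      have hrunk : ∀ d ∈ run, isWsB d = k := by
        intro d hd
        rw [hrun] at hd
        have hp : (fun d => isWsB d == k) d = true := List.mem_takeWhile_imp (p := fun d => isWsB d == k) hd
        simpa using hp
      have hresthead : rest = [] ∨ pyIsWhitespace rest.head! = (!k) := by
        rcases hre : rest with _ | ⟨d, rs⟩
        · exact Or.inl rfl
        · right
          have hd : (fun d => isWsB d == k) d = false := by
            have := List.head?_dropWhile_not (p := fun d => isWsB d == k) cs
            rw [← hrest, hre] at this
            simpa using this
          simp only [beq_eq_false_iff_ne, ne_eq] at hd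
          simp only [List.head!_cons, isWs_eq]
          cases hkk : k
          · simp [hkk] at hd; simp [hd]
          · simp [hkk] at hd; simp [hd]
      have hrunsB : runsB (c :: cs) = (k, c :: run) :: runsB rest := by
        rw [runsB.eq_def]
      rw [hrunsB]
      cases hkk : k with
      | true =>
        have hcws : pyIsWhitespace c = true := by rw [isWs_eq, ← hk, hkk]
        have hall : ∀ d ∈ (c :: run), pyIsWhitespace d = true := by
          intro d hd
          rcases List.mem_cons.mp hd with h1 | h1
          · subst h1; exact hcws
          · rw [isWs_eq, hrunk d h1, hkk]
        conv_lhs => rw [show c :: cs = (c :: run) ++ rest by simp [hsplit]]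
        rw [goWsRun (c :: run) hall rest t o]
        rw [ih rest hrestlen]
        simp [runsFoldB]
      | false =>
        have hcnw : pyIsWhitespace c = false := by rw [isWs_eq, ← hk, hkk]
        have hall : ∀ d ∈ run, pyIsWhitespace d = false := by
          intro d hd; rw [isWs_eq, hrunk d hd, hkk]
        conv_lhs => rw [show c :: cs = (c :: run) ++ rest by simp [hsplit]]
        rw [goTokRun c run hcnw hall rest t o]
        have hprev : rest = [] ∨ pyIsWhitespace rest.head! = true := by
          rcases hresthead with h1 | h1
          · exact Or.inl h1
          · right; rw [h1, hkk]; rfl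
        rw [goPrevIrrel rest _ _ hprev]
        rw [ih rest hrestlen]
        simp only [runsFoldB, if_false, Bool.false_eq_true]
        congr 2
        simp [List.replicate]

-- ===== VERDICT (by name: the statement is the Claim_ definition above) =====
theorem sent2token_spec : Claim_equal_sent2token := by
  intro sent _
  unfold Spec_sent2token sent2token sent2token_alt
  exact main_aux sent.toList.length sent.toList le_rfl [] []
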